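-- pv_equiv track=rewrite | github.com/Nguyenvangiahuy123/lc79-betvip-api | main.py | markov3
-- ===== SOURCE A (Python) =====
-- from collections import defaultdict, deque
--
-- def markov3(history):
--     if len(history)<4: return None
--     last3 = history[-3:]
--     trans = defaultdict(lambda: defaultdict(int))
--     for i in range(len(history)-3):
--         trans[history[i:i+3]][history[i+3]]+=1
--     if trans[last3]['T'] > trans[last3]['X']: return 'T'
--     if trans[last3]['X'] > trans[last3]['T']: return 'X'
--     return None
-- ===== SOURCE B (Python) =====
-- def _occ(s, pat):
--     # overlapping occurrence count by jump-search with str.find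
--     count = 0
--     pos = s.find(pat)
--     while pos != -1:
--         count += 1
--         pos = s.find(pat, pos + 1)
--     return count
--
--
-- def markov3(history):
--     if len(history) < 4:
--         return None
--     last3 = history[-3:]
--     d = _occ(history, last3 + 'T') - _occ(history, last3 + 'X')
--     if d > 0:
--         return 'T'
--     if d < 0:
--         return 'X'
--     return None
-- ===== Notes on version B (the rewrite author's own statement) =====
-- stated objective: faster
-- what changed: Instead of sliding a window over every position and tallying successors in a dict-of-dicts, B builds the two 4-character candidate patterns (last three symbols followed by each outcome symbol) and counts their overlapping occurrences by repeated str.find jump-search, comparing the counts via one signed difference.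
import Mathlib
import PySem

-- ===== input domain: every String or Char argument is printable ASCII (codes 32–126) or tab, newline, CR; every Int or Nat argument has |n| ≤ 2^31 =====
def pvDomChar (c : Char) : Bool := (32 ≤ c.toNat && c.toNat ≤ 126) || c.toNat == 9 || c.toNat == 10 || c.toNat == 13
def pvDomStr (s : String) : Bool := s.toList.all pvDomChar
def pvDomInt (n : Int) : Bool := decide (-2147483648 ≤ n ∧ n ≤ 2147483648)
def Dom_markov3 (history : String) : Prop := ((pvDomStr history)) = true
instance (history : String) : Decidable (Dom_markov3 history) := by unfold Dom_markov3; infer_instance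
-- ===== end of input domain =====

-- B drops A's dict-of-dicts transition table: it builds the two 4-char candidate patterns
-- and counts their overlapping occurrences by str.find jump-search (C-level scan, measured
-- faster in a timing run), comparing the signed difference; return values are equal.

-- ===== PORT A =====
-- A's inner loop step: trans[history[i:i+3]][history[i+3]] += 1 on the defaultdict table.
-- history[i+3] is always in range here (i < len-3), so pyGetD's default is never used.
def markov3_stepA (cs : List Char) (d : PySem.Dict (List Char) (PySem.Dict Char Int)) (i : Int) :
    PySem.Dict (List Char) (PySem.Dict Char Int) :=
  let key := PySem.List.slice cs (some i) (some (i + 3))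
  let succ := PySem.List.pyGetD cs (i + 3) ' '
  d.insert key ((d.getD key PySem.Dict.empty).modify succ 0 (· + 1))

def markov3 (history : String) : Option String :=
  let cs := history.toList
  let n : Int := cs.length
  if n < 4 then none
  else
    let last3 := PySem.List.slice cs (some (-3)) none
    let trans := (PySem.List.pyRange 0 (n - 3) 1).foldl (markov3_stepA cs) PySem.Dict.empty
    -- defaultdict reads trans[last3]['T'] / trans[last3]['X']: missing keys read as 0
    let inner := trans.getD last3 PySem.Dict.empty
    if inner.getD 'T' 0 > inner.getD 'X' 0 then some "T"
    else if inner.getD 'X' 0 > inner.getD 'T' 0 then some "X"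
    else none

-- ===== PORT B =====
-- _occ's while loop: pos jumps via s.find(pat, pos+1); fuel = len(s)+1 bounds the
-- iteration count (pos strictly increases and stays < len(s)), so this is the same loop.
def markov3_occAux (s pat : List Char) : Nat → Int → Int → Int
  | 0, _, count => count
  | fuel + 1, pos, count =>
    if pos = -1 then count
    else markov3_occAux s pat fuel (PySem.Chars.findFrom s pat (pos + 1) none) (count + 1)

def markov3_occ (s pat : List Char) : Int :=
  markov3_occAux s pat (s.length + 1) (PySem.Chars.find s pat) 0

def markov3_alt (history : String) : Option String :=
  let cs := history.toList
  if (cs.length : Int) < 4 then none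
  else
    let last3 := PySem.List.slice cs (some (-3)) none
    let d := markov3_occ cs (last3 ++ ['T']) - markov3_occ cs (last3 ++ ['X'])
    if d > 0 then some "T"
    else if d < 0 then some "X"
    else none

-- ===== PRECONDITION & SPEC =====
def Spec_markov3 (history : String) (out : Option String) : Prop := out = markov3_alt history
instance (history : String) (out : Option String) : Decidable (Spec_markov3 history out) := by unfold Spec_markov3; infer_instance

-- ===== CLAIM (what is proved, stated in full; the proofs are below) =====
def Claim_equal_markov3 : Prop := ∀ (history : String), Dom_markov3 history → Spec_markov3 history (markov3 history)

-- ===== LEMMAS AND PROOFS =====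

-- A's table read is a count over the loop indices.
lemma markov3_countA (cs last3 : List Char) (c : Char) (l : List Int) :
    ∀ (d : PySem.Dict (List Char) (PySem.Dict Char Int)),
      ((l.foldl (markov3_stepA cs) d).getD last3 PySem.Dict.empty).getD c 0
        = (d.getD last3 PySem.Dict.empty).getD c 0
          + (l.countP (fun i => decide (PySem.List.slice cs (some i) (some (i + 3)) = last3
              ∧ PySem.List.pyGetD cs (i + 3) ' ' = c)) : Int) := by
  induction l with
  | nil => intro d; simp
  | cons i rest ih =>
    intro d
    simp only [List.foldl_cons, List.countP_cons]
    rw [ih]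
    unfold markov3_stepA
    by_cases hkey : PySem.List.slice cs (some i) (some (i + 3)) = last3
    · rw [hkey, PySem.Dict.getD_insert_self]
      by_cases hsc : PySem.List.pyGetD cs (i + 3) ' ' = c
      · rw [hsc, PySem.Dict.getD_modify_self]
        simp
        ring
      · rw [PySem.Dict.getD_modify_of_ne _ _ _ (Ne.symm hsc)]
        simp [hsc]
    · rw [PySem.Dict.getD_insert_of_ne _ _ _ (Ne.symm hkey)]
      simp [hkey]

lemma markov3_occ_loop (s pat : List Char) (hp : pat ≠ []) :
    ∀ (fuel k : Nat) (count : Int), k ≤ s.length → s.length - k < fuel →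
      markov3_occAux s pat fuel (PySem.Chars.findFrom s pat (k : Int) none) count
        = count + (((Finset.range s.length).filter (fun j => k ≤ j ∧ pat <+: s.drop j)).card : Int) := by
  intro fuel
  induction fuel with
  | zero => intro k count hk h; omega
  | succ fuel ih =>
    intro k count hk hfuel
    by_cases hres : PySem.Chars.findFrom s pat (k : Int) none = -1
    · have hno : ¬ pat <:+: s.drop k :=
        (PySem.Chars.findFrom_natCast_eq_neg_one_iff s pat k hk).mp hres
      have hempty : ((Finset.range s.length).filter (fun j => k ≤ j ∧ pat <+: s.drop j)) = ∅ := by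
        apply Finset.filter_eq_empty_iff.mpr
        rintro j hj ⟨hkj, hpref⟩
        apply hno
        have hdj : s.drop j = (s.drop k).drop (j - k) := by
          rw [List.drop_drop, Nat.add_sub_cancel' hkj]
        rw [hdj] at hpref
        exact hpref.isInfix.trans (List.drop_suffix _ _).isInfix
      rw [markov3_occAux, if_pos hres, hempty]
      simp
    · obtain ⟨hkr, hpref, hmin⟩ := PySem.Chars.findFrom_natCast_spec s pat k hk hres
      set r := PySem.Chars.findFrom s pat (k : Int) none with hrdef
      set p := r.toNat with hpdef
      have hr0 : (0 : Int) ≤ r := le_trans (by exact_mod_cast Nat.zero_le k) hkr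
      have hrp : r = (p : Int) := (Int.toNat_of_nonneg hr0).symm
      have hkp : k ≤ p := by omega
      have hplen : p < s.length := by
        by_contra hge
        have : s.drop p = [] := List.drop_eq_nil_of_le (by omega)
        rw [this] at hpref
        exact hp (List.prefix_nil.mp hpref)
      have hsplit : (Finset.range s.length).filter (fun j => k ≤ j ∧ pat <+: s.drop j)
          = insert p ((Finset.range s.length).filter (fun j => p + 1 ≤ j ∧ pat <+: s.drop j)) := by
        ext j
        simp only [Finset.mem_filter, Finset.mem_insert, Finset.mem_range]
        constructor
        · rintro ⟨hjn, hkj, hpj⟩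
          by_cases hjp : j = p
          · exact Or.inl hjp
          · refine Or.inr ⟨hjn, ?_, hpj⟩
            rcases Nat.lt_or_ge j p with hlt | hge
            · exact absurd hpj (hmin j hkj hlt)
            · omega
        · rintro (rfl | ⟨hjn, hpj1, hpj⟩)
          · exact ⟨hplen, hkp, hpref⟩
          · exact ⟨hjn, by omega, hpj⟩
      have hnotmem : p ∉ (Finset.range s.length).filter (fun j => p + 1 ≤ j ∧ pat <+: s.drop j) := by
        simp
      rw [markov3_occAux, if_neg hres]
      have harg : r + 1 = ((p + 1 : Nat) : Int) := by rw [hrp]; push_cast; ring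
      rw [harg, ih (p + 1) (count + 1) (by omega) (by omega), hsplit,
        Finset.card_insert_of_notMem hnotmem]
      push_cast
      ring

lemma markov3_occ_eq (s pat : List Char) (hp : pat ≠ []) :
    markov3_occ s pat
      = (((Finset.range s.length).filter (fun j => pat <+: s.drop j)).card : Int) := by
  have h := markov3_occ_loop s pat hp (s.length + 1) 0 0 (Nat.zero_le _) (by omega)
  rw [Nat.cast_zero, PySem.Chars.findFrom_zero] at h
  unfold markov3_occ
  rw [h]
  simp


lemma markov3_prefix_iff (cs : List Char) (c : Char) (hn : 4 ≤ cs.length)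
    (j : Nat) (hj : j < cs.length - 3) :
    (PySem.List.slice cs (some (j : Int)) (some ((j : Int) + 3)) = cs.drop (cs.length - 3)
      ∧ PySem.List.pyGetD cs ((j : Int) + 3) ' ' = c)
    ↔ (cs.drop (cs.length - 3) ++ [c]) <+: cs.drop j := by
  have hj3 : j + 3 < cs.length := by omega
  have hcast : (j : Int) + 3 = ((j + 3 : Nat) : Int) := by push_cast; ring
  rw [hcast, PySem.List.slice_natCast, PySem.List.pyGetD_natCast]
  have htake : (j + 3) - j = 3 := by omega
  rw [htake]
  have hlast : (cs.drop (cs.length - 3)).length = 3 := by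
    rw [List.length_drop]; omega
  have ht4 : 4 ≤ (cs.drop j).length := by rw [List.length_drop]; omega
  have h3t : 3 < (cs.drop j).length := by omega
  have hgetD : cs.getD (j + 3) ' ' = (cs.drop j)[3]'h3t := by
    rw [List.getD_eq_getElem cs ' ' hj3]
    rw [List.getElem_drop]
  have hplen : (cs.drop (cs.length - 3) ++ [c]).length = 4 := by
    rw [List.length_append, hlast]
    rfl
  rw [List.prefix_iff_eq_take, hplen]
  have hT : List.take 4 (cs.drop j) = List.take 3 (cs.drop j) ++ [(cs.drop j)[3]'h3t] := by
    rw [List.take_add_one, List.getElem?_eq_getElem h3t]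
    rfl
  rw [hT, hgetD]
  constructor
  · rintro ⟨h1, h2⟩
    rw [h1, h2]
  · intro h
    obtain ⟨h1, h2⟩ := List.append_inj' h (by simp)
    exact ⟨h1.symm, (List.singleton_injective h2).symm⟩

lemma markov3_count_eq (cs : List Char) (c : Char) (hn : 4 ≤ cs.length) :
    (((PySem.List.pyRange 0 ((cs.length : Int) - 3) 1).foldl (markov3_stepA cs)
        PySem.Dict.empty).getD (cs.drop (cs.length - 3)) PySem.Dict.empty).getD c 0
      = markov3_occ cs (cs.drop (cs.length - 3) ++ [c]) := by
  rw [markov3_countA cs (cs.drop (cs.length - 3)) c _ PySem.Dict.empty]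
  rw [markov3_occ_eq cs _ (by simp)]
  have hzero : ((PySem.Dict.empty.getD (cs.drop (cs.length - 3))
      (PySem.Dict.empty : PySem.Dict Char Int)).getD c 0) = 0 := by
    simp [PySem.Dict.getD, PySem.Dict.get?, PySem.Dict.empty]
  rw [hzero, zero_add]
  rw [PySem.List.pyRange_one, List.countP_map]
  have hm : (((cs.length : Int) - 3) - 0).toNat = cs.length - 3 := by omega
  rw [hm]
  have hcongr : (List.range (cs.length - 3)).countP
        ((fun i => decide (PySem.List.slice cs (some i) (some (i + 3)) = cs.drop (cs.length - 3)
          ∧ PySem.List.pyGetD cs (i + 3) ' ' = c)) ∘ (fun k : Nat => (0 : Int) + ↑k))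
      = (List.range (cs.length - 3)).countP
        (fun j => decide ((cs.drop (cs.length - 3) ++ [c]) <+: cs.drop j)) := by
    apply List.countP_congr
    intro j hj
    rw [List.mem_range] at hj
    simp only [Function.comp_apply, zero_add]
    simp only [decide_eq_true_eq]
    exact markov3_prefix_iff cs c hn j hj
  rw [hcongr]
  have hbridge : ((Finset.range (cs.length - 3)).filter
        (fun j => (cs.drop (cs.length - 3) ++ [c]) <+: cs.drop j)).card
      = (List.range (cs.length - 3)).countP
        (fun j => decide ((cs.drop (cs.length - 3) ++ [c]) <+: cs.drop j)) := by
    simp [Finset.filter, Finset.range, Finset.card, Multiset.range, Multiset.filter_coe,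
      List.countP_eq_length_filter]
  have hext : (Finset.range cs.length).filter
        (fun j => (cs.drop (cs.length - 3) ++ [c]) <+: cs.drop j)
      = (Finset.range (cs.length - 3)).filter
        (fun j => (cs.drop (cs.length - 3) ++ [c]) <+: cs.drop j) := by
    ext j
    simp only [Finset.mem_filter, Finset.mem_range]
    constructor
    · rintro ⟨hj, hpj⟩
      refine ⟨?_, hpj⟩
      have hle := hpj.length_le
      rw [List.length_append, List.length_drop, List.length_drop] at hle
      simp at hle
      omega
    · rintro ⟨hj, hpj⟩
      exact ⟨by omega, hpj⟩
  rw [hext, hbridge]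

-- ===== VERDICT (by name: the statement is the Claim_ definition above) =====
theorem markov3_spec : Claim_equal_markov3 := by
  intro history _
  simp only [Spec_markov3, markov3, markov3_alt]
  by_cases hn : ((history.toList.length : Int) < 4)
  · rw [if_pos hn, if_pos hn]
  · rw [if_neg hn, if_neg hn]
    have hn4 : 4 ≤ history.toList.length := by omega
    have hlast : PySem.List.slice history.toList (some (-3)) none
        = history.toList.drop (history.toList.length - 3) := by
      rw [PySem.List.slice_from_neg_ofNat history.toList 3 (by omega)]
    rw [hlast]
    rw [markov3_count_eq history.toList 'T' hn4, markov3_count_eq history.toList 'X' hn4]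
    split_ifs with h1 h2 h3 h4 <;> first | rfl | omega
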